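-- pv_equiv track=rewrite | github.com/schwa456/thesis_refactored | src/modules/filters/bidirectional_agent_filter.py | _apply_additions
-- ===== SOURCE A (Python) =====
-- from typing import Dict, List, Any, Set, Iterable
--
-- def _apply_additions(
--
--     current: Dict[str, List[str]],
--     additions: Iterable[str],
--     valid: Set[str],
-- ) -> Dict[str, List[str]]:
--     updated = {t: list(cols) for t, cols in current.items()}
--     for node in additions:
--         if node not in valid or "." not in node:
--             continue
--         tbl, col = node.split(".", 1)
--         updated.setdefault(tbl, [])
--         if col not in updated[tbl]:
--             updated[tbl].append(col)
--     return updated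
-- ===== SOURCE B (Python) =====
-- def _apply_additions(current, additions, valid):
--     # Two-phase decomposition: parse & group additions by table first, then merge
--     # each table's new columns into a copy of current in one per-table pass.
--     parsed = [tuple(node.split(".", 1)) for node in additions
--               if node in valid and "." in node]
--     grouped = {}
--     for tbl, col in parsed:
--         grouped.setdefault(tbl, []).append(col)
--     updated = {t: list(cols) for t, cols in current.items()}
--     for tbl, cols in grouped.items():
--         existing = updated.setdefault(tbl, [])
--         for col in cols:
--             if col not in existing:
--                 existing.append(col)
--     return updated
-- ===== Notes on version B (the rewrite author's own statement) =====
-- stated objective: alternative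
-- what changed: A makes one interleaved scan over additions mutating the result dict node by node; B first groups the valid 'table.column' additions into an intermediate per-table index and then merges each table's collected columns into a copy of current in a separate per-table pass.
import Mathlib
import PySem

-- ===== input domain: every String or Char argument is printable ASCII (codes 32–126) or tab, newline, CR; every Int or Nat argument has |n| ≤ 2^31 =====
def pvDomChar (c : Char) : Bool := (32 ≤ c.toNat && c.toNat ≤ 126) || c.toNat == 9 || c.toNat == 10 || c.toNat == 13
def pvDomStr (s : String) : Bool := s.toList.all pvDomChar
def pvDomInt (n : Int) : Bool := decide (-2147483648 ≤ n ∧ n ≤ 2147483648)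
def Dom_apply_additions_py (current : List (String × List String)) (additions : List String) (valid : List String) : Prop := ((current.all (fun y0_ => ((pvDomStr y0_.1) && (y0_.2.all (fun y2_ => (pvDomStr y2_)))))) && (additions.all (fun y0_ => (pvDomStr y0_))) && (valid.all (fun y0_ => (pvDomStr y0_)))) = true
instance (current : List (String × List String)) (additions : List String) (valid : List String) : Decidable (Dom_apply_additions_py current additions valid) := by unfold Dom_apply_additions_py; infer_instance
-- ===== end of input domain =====

-- B rebuilds the result in two phases — group the valid "table.column" additions by table
-- first, then merge each table's new columns in one per-table pass — instead of A's single
-- interleaved scan mutating the dict per node (objective: alternative decomposition; same result).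

-- ===== PORT A =====
def apply_additions_py (current : List (String × List String)) (additions : List String) (valid : List String) : List (String × List String) :=
  let updated : PySem.Dict String (List String) := PySem.Dict.ofList current
  let updated := additions.foldl (fun u node =>
    if !(PySem.Set.contains valid node) || !(PySem.Str.isIn "." node) then u
    else
      match PySem.Str.splitMax? node "." 1 with
      | some (tbl :: col :: _) =>
        let u := u.setdefault tbl []
        if (u.getD tbl []).contains col then u
        else u.modify tbl [] (fun cs => cs ++ [col])
      | _ => u) updated
  updated.items

-- ===== PORT B =====
def apply_additions_py_alt (current : List (String × List String)) (additions : List String) (valid : List String) : List (String × List String) :=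
  let parsed : List (String × String) := additions.filterMap (fun node =>
    if PySem.Set.contains valid node && PySem.Str.isIn "." node then
      match PySem.Str.splitMax? node "." 1 with
      | some (tbl :: col :: _) => some (tbl, col)
      | some [] => none
      | some [_] => none
      | none => none
    else none)
  let grouped : PySem.Dict String (List String) :=
    parsed.foldl (fun d p => d.modify p.1 [] (fun cs => cs ++ [p.2])) PySem.Dict.empty
  let updated : PySem.Dict String (List String) := PySem.Dict.ofList current
  let updated := grouped.items.foldl (fun u pr =>
    let u := u.setdefault pr.1 []
    u.insert pr.1 (pr.2.foldl (fun ex c => if ex.contains c then ex else ex ++ [c]) (u.getD pr.1 []))) updated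
  updated.items

-- ===== PRECONDITION & SPEC =====
def Spec_apply_additions_py (current : List (String × List String)) (additions : List String) (valid : List String) (out : List (String × List String)) : Prop := out = apply_additions_py_alt current additions valid
instance (current : List (String × List String)) (additions : List String) (valid : List String) (out : List (String × List String)) : Decidable (Spec_apply_additions_py current additions valid out) := by unfold Spec_apply_additions_py; infer_instance

-- ===== CLAIM (what is proved, stated in full; the proofs are below) =====
def Claim_equal_apply_additions_py : Prop := ∀ (current : List (String × List String)) (additions : List String) (valid : List String), Dom_apply_additions_py current additions valid → Spec_apply_additions_py current additions valid (apply_additions_py current additions valid)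

-- ===== LEMMAS AND PROOFS =====

-- proof-side names for the loop bodies of the two ports
def pvGuard (valid : List String) (node : String) : Option (String × String) :=
  if PySem.Set.contains valid node && PySem.Str.isIn "." node then
    match PySem.Str.splitMax? node "." 1 with
    | some (tbl :: col :: _) => some (tbl, col)
    | some [] => none
    | some [_] => none
    | none => none
  else none

def pvAdd (ex : List String) (c : String) : List String :=
  if ex.contains c then ex else ex ++ [c]

def pvUpd (u : PySem.Dict String (List String)) (tb c : String) : PySem.Dict String (List String) :=
  if ((u.setdefault tb []).getD tb []).contains c then u.setdefault tb []
  else (u.setdefault tb []).modify tb [] (fun cs => cs ++ [c])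

def pvMerge (u : PySem.Dict String (List String)) (pr : String × List String) : PySem.Dict String (List String) :=
  (u.setdefault pr.1 []).insert pr.1
    (pr.2.foldl (fun ex c => if ex.contains c then ex else ex ++ [c])
      ((u.setdefault pr.1 []).getD pr.1 []))

-- A's loop body = pvGuard + pvUpd
lemma bodyA_eq (valid : List String) (u : PySem.Dict String (List String)) (n : String) :
    (if !(PySem.Set.contains valid n) || !(PySem.Str.isIn "." n) then u
     else
       match PySem.Str.splitMax? n "." 1 with
       | some (tbl :: col :: _) =>
         let u' := u.setdefault tbl []
         if (u'.getD tbl []).contains col then u'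
         else u'.modify tbl [] (fun cs => cs ++ [col])
       | _ => u)
    = match pvGuard valid n with
      | none => u
      | some p => pvUpd u p.1 p.2 := by
  unfold pvGuard pvUpd
  by_cases hc : PySem.Set.contains valid n = true <;>
    by_cases hi : PySem.Str.isIn "." n = true <;>
      simp only [hc, hi, Bool.not_true, Bool.not_false, Bool.false_or, Bool.or_true,
        Bool.true_or, Bool.and_self, Bool.true_and, Bool.false_and, Bool.and_false,
        if_true, if_false, Bool.false_eq_true, ite_false, ite_true]
  rcases hs : PySem.Str.splitMax? n "." 1 with _ | l
  · rfl
  · rcases l with _ | ⟨t, _ | ⟨c, r⟩⟩ <;> rfl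

lemma foldA (valid : List String) (adds : List String) :
    ∀ (u : PySem.Dict String (List String)),
    adds.foldl (fun u node =>
      if !(PySem.Set.contains valid node) || !(PySem.Str.isIn "." node) then u
      else
        match PySem.Str.splitMax? node "." 1 with
        | some (tbl :: col :: _) =>
          let u := u.setdefault tbl []
          if (u.getD tbl []).contains col then u
          else u.modify tbl [] (fun cs => cs ++ [col])
        | _ => u) u
    = (adds.filterMap (pvGuard valid)).foldl (fun u p => pvUpd u p.1 p.2) u := by
  induction adds with
  | nil => intro u; rfl
  | cons n rest ih =>
    intro u
    simp only [List.foldl_cons, List.filterMap_cons]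
    rw [bodyA_eq valid u n]
    cases hg : pvGuard valid n with
    | none => simpa using ih u
    | some p => simpa using ih (pvUpd u p.1 p.2)

lemma A_canon (current : List (String × List String)) (additions : List String) (valid : List String) :
    apply_additions_py current additions valid
    = ((additions.filterMap (pvGuard valid)).foldl (fun u p => pvUpd u p.1 p.2)
        (PySem.Dict.ofList current)).items := by
  have h := foldA valid additions (PySem.Dict.ofList current)
  exact congrArg PySem.Dict.items h

lemma B_canon (current : List (String × List String)) (additions : List String) (valid : List String) :
    apply_additions_py_alt current additions valid
    = (((additions.filterMap (pvGuard valid)).foldl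
          (fun d p => d.modify p.1 [] (fun cs => cs ++ [p.2])) PySem.Dict.empty).items.foldl
        pvMerge (PySem.Dict.ofList current)).items := rfl

-- getD / keys of one pvUpd step
lemma pvUpd_getD (u : PySem.Dict String (List String)) (tb c t : String) :
    (pvUpd u tb c).getD t [] = if t = tb then pvAdd (u.getD tb []) c else u.getD t [] := by
  unfold pvUpd pvAdd
  have hsd : (u.setdefault tb []).getD tb [] = u.getD tb [] :=
    PySem.Dict.getD_setdefault_self u tb [] []
  rw [hsd]
  by_cases hct : (u.getD tb []).contains c = true
  · rw [if_pos hct]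
    by_cases ht : t = tb
    · subst ht; rw [if_pos rfl, if_pos hct, hsd]
    · rw [if_neg ht, PySem.Dict.getD_eq_get?_getD, PySem.Dict.get?_setdefault_of_ne u [] ht,
        ← PySem.Dict.getD_eq_get?_getD]
  · rw [if_neg hct, PySem.Dict.getD_modify]
    by_cases ht : t = tb
    · subst ht; rw [if_pos rfl, if_pos rfl, if_neg hct, hsd]
    · rw [if_neg ht, if_neg ht, PySem.Dict.getD_eq_get?_getD,
        PySem.Dict.get?_setdefault_of_ne u [] ht, ← PySem.Dict.getD_eq_get?_getD]

lemma pvUpd_keys (u : PySem.Dict String (List String)) (tb c : String) :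
    (pvUpd u tb c).keys = PySem.Set.add u.keys tb := by
  unfold pvUpd
  have hkeys : (u.setdefault tb []).keys = PySem.Set.add u.keys tb := by
    rw [PySem.Dict.keys_setdefault]
    unfold PySem.Set.add
    by_cases hm : tb ∈ u.keys
    · rw [if_pos ((PySem.Dict.contains_iff_mem_keys u tb).mpr hm),
        if_pos ((PySem.Set.contains_iff u.keys tb).mpr hm)]
    · rw [if_neg (by simp [PySem.Dict.contains_iff_mem_keys, hm]),
        if_neg (by simp [PySem.Set.contains_iff, hm])]
  by_cases hct : ((u.setdefault tb []).getD tb []).contains c = true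
  · rw [if_pos hct]; exact hkeys
  · rw [if_neg hct, PySem.Dict.keys_modify,
      PySem.Dict.keys_insert_of_contains _ _ (by rw [PySem.Dict.contains_setdefault]; simp)]
    exact hkeys

-- getD / keys of a fold of pvUpd steps
lemma foldUpd_getD (ps : List (String × String)) :
    ∀ (u : PySem.Dict String (List String)) (t : String),
    (ps.foldl (fun u p => pvUpd u p.1 p.2) u).getD t []
    = ((ps.filter (fun p => p.1 == t)).map Prod.snd).foldl pvAdd (u.getD t []) := by
  induction ps with
  | nil => intro u t; rfl
  | cons p ps ih =>
    intro u t
    simp only [List.foldl_cons, List.filter_cons]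
    by_cases hp : p.1 = t
    · rw [if_pos (by simpa using hp), List.map_cons, List.foldl_cons, ih,
        pvUpd_getD, if_pos hp.symm, hp]
    · rw [if_neg (by simpa using hp), ih, pvUpd_getD, if_neg (fun h => hp h.symm)]

lemma foldUpd_keys (ps : List (String × String)) :
    ∀ (u : PySem.Dict String (List String)),
    (ps.foldl (fun u p => pvUpd u p.1 p.2) u).keys
    = PySem.Set.update u.keys (ps.map Prod.fst) := by
  induction ps with
  | nil => intro u; rfl
  | cons p ps ih =>
    intro u
    simp only [List.foldl_cons, List.map_cons]
    rw [ih]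
    unfold PySem.Set.update
    rw [List.foldl_cons, pvUpd_keys]

-- getD / keys of one pvMerge step
lemma pvMerge_getD (u : PySem.Dict String (List String)) (pr : String × List String) (t : String) :
    (pvMerge u pr).getD t []
    = if t = pr.1 then pr.2.foldl pvAdd (u.getD pr.1 []) else u.getD t [] := by
  unfold pvMerge
  have hsd : (u.setdefault pr.1 []).getD pr.1 [] = u.getD pr.1 [] :=
    PySem.Dict.getD_setdefault_self u pr.1 [] []
  rw [hsd]
  by_cases ht : t = pr.1
  · subst ht; rw [if_pos rfl, PySem.Dict.getD_insert_self]; rfl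
  · rw [if_neg ht, PySem.Dict.getD_insert_of_ne _ _ _ ht, PySem.Dict.getD_eq_get?_getD,
      PySem.Dict.get?_setdefault_of_ne u [] ht, ← PySem.Dict.getD_eq_get?_getD]

lemma pvMerge_keys (u : PySem.Dict String (List String)) (pr : String × List String) :
    (pvMerge u pr).keys = PySem.Set.add u.keys pr.1 := by
  unfold pvMerge
  rw [PySem.Dict.keys_insert_of_contains _ _ (by rw [PySem.Dict.contains_setdefault]; simp),
    PySem.Dict.keys_setdefault]
  unfold PySem.Set.add
  by_cases hm : pr.1 ∈ u.keys
  · rw [if_pos ((PySem.Dict.contains_iff_mem_keys u pr.1).mpr hm),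
      if_pos ((PySem.Set.contains_iff u.keys pr.1).mpr hm)]
  · rw [if_neg (by simp [PySem.Dict.contains_iff_mem_keys, hm]),
      if_neg (by simp [PySem.Set.contains_iff, hm])]

lemma foldMerge_keys (l : List (String × List String)) :
    ∀ (u : PySem.Dict String (List String)),
    (l.foldl pvMerge u).keys = PySem.Set.update u.keys (l.map Prod.fst) := by
  induction l with
  | nil => intro u; rfl
  | cons pr l ih =>
    intro u
    simp only [List.foldl_cons, List.map_cons]
    rw [ih]
    unfold PySem.Set.update
    rw [List.foldl_cons, pvMerge_keys]

lemma foldMerge_getD_notmem (l : List (String × List String)) :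
    ∀ (u : PySem.Dict String (List String)) (t : String), t ∉ l.map Prod.fst →
    (l.foldl pvMerge u).getD t [] = u.getD t [] := by
  induction l with
  | nil => intro u t _; rfl
  | cons pr l ih =>
    intro u t ht
    simp only [List.map_cons, List.mem_cons, not_or] at ht
    rw [List.foldl_cons, ih _ _ ht.2, pvMerge_getD, if_neg ht.1]

lemma foldMerge_getD_mem (l : List (String × List String)) :
    ∀ (u : PySem.Dict String (List String)) (t : String) (v : List String),
    (l.map Prod.fst).Nodup → (t, v) ∈ l →
    (l.foldl pvMerge u).getD t [] = v.foldl pvAdd (u.getD t []) := by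
  induction l with
  | nil => intro u t v _ hm; simp at hm
  | cons pr l ih =>
    intro u t v hnd hm
    rw [List.map_cons, List.nodup_cons] at hnd
    rw [List.foldl_cons]
    rcases List.mem_cons.mp hm with heq | hmem
    · have ht : pr.1 = t := by rw [← heq]
      have hv : pr.2 = v := by rw [← heq]
      have hnot : t ∉ l.map Prod.fst := by rw [← ht]; exact hnd.1
      rw [foldMerge_getD_notmem l _ t hnot, pvMerge_getD, if_pos ht.symm, ht, hv]
    · have hne : t ≠ pr.1 := by
        intro h
        exact hnd.1 (h ▸ (List.mem_map.mpr ⟨(t, v), hmem, rfl⟩))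
      rw [ih _ t v hnd.2 hmem, pvMerge_getD, if_neg hne]

-- Set facts
lemma update_nodup_disjoint (l : List String) :
    ∀ (s : PySem.Set String), l.Nodup → (∀ a ∈ l, a ∉ s) →
    PySem.Set.update s l = s ++ l := by
  induction l with
  | nil => intro s _ _; simp [PySem.Set.update]
  | cons a l ih =>
    intro s hnd hdis
    rw [List.nodup_cons] at hnd
    have ha' : a ∉ s := hdis a (by simp)
    have ha : PySem.Set.add s a = s ++ [a] := by
      unfold PySem.Set.add
      rw [if_neg (by simp [ha'])]
    have : PySem.Set.update s (a :: l) = PySem.Set.update (s ++ [a]) l := by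
      unfold PySem.Set.update
      rw [List.foldl_cons, ha]
    rw [this, ih (s ++ [a]) hnd.2 (by
      intro b hb
      simp only [List.mem_append, List.mem_singleton, not_or]
      exact ⟨hdis b (List.mem_cons_of_mem a hb), fun h => hnd.1 (h ▸ hb)⟩)]
    simp

lemma ofList_nodup_self (l : List String) (h : l.Nodup) : PySem.Set.ofList l = l := by
  rw [PySem.Set.ofList_eq_foldl]
  have := update_nodup_disjoint l [] h (by simp)
  unfold PySem.Set.update at this
  simpa using this

lemma update_ofList (s : PySem.Set String) (l : List String) :
    PySem.Set.update s (PySem.Set.ofList l) = PySem.Set.update s l := by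
  rw [PySem.Set.update_eq_append_filter s (PySem.Set.ofList l),
    PySem.Set.update_eq_append_filter s l,
    ofList_nodup_self (PySem.Set.ofList l) (PySem.Set.nodup_ofList l)]

-- Dict facts
lemma get?_eq_some_getD (d : PySem.Dict String (List String)) (t : String)
    (h : d.contains t = true) : d.get? t = some (d.getD t []) := by
  rw [PySem.Dict.contains_eq_isSome_get?] at h
  cases hg : d.get? t with
  | none => rw [hg] at h; simp at h
  | some v => rw [PySem.Dict.getD_eq_get?_getD, hg]; rfl

lemma items_ext (d e : PySem.Dict String (List String)) (hnd : d.keys.Nodup)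
    (hk : d.keys = e.keys) (hv : ∀ t ∈ d.keys, d.get? t = e.get? t) : d.items = e.items := by
  have hne : e.keys.Nodup := hk ▸ hnd
  have hlen : d.items.length = e.items.length := by
    have := congrArg List.length hk
    simpa [PySem.Dict.keys] using this
  apply List.ext_getElem hlen
  intro i h1 h2
  have hk1 : d.items[i].1 = e.items[i].1 := by
    have h1' : i < d.keys.length := by simpa [PySem.Dict.keys] using h1
    have h2' : i < e.keys.length := by simpa [PySem.Dict.keys] using h2
    have h3 : d.keys[i] = e.keys[i] := List.getElem_of_eq hk h1'
    simpa [PySem.Dict.keys] using h3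
  have hmemd : (d.items[i].1, d.items[i].2) ∈ d.items := by
    simpa using List.getElem_mem h1
  have hmeme : (e.items[i].1, e.items[i].2) ∈ e.items := by
    simpa using List.getElem_mem h2
  have hgd : d.get? d.items[i].1 = some d.items[i].2 :=
    PySem.Dict.get?_of_mem_items d hmemd hnd
  have hge : e.get? e.items[i].1 = some e.items[i].2 :=
    PySem.Dict.get?_of_mem_items e hmeme hne
  have hmemk : d.items[i].1 ∈ d.keys := by
    unfold PySem.Dict.keys
    exact List.mem_map.mpr ⟨d.items[i], List.getElem_mem h1, rfl⟩
  have hsnd : d.items[i].2 = e.items[i].2 := by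
    have := hv _ hmemk
    rw [hgd, hk1, hge] at this
    exact Option.some.inj this
  have : (d.items[i].1, d.items[i].2) = (e.items[i].1, e.items[i].2) := by
    rw [hk1, hsnd]
  simpa using this

-- main equivalence
lemma main_eq (current : List (String × List String)) (additions : List String) (valid : List String) :
    apply_additions_py current additions valid = apply_additions_py_alt current additions valid := by
  rw [A_canon, B_canon]
  set cur : PySem.Dict String (List String) := PySem.Dict.ofList current with hcur
  set ps : List (String × String) := additions.filterMap (pvGuard valid) with hps
  set grouped : PySem.Dict String (List String) :=
    ps.foldl (fun d p => d.modify p.1 [] (fun cs => cs ++ [p.2])) PySem.Dict.empty with hgrouped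
  have hgk : grouped.keys = PySem.Set.update ([] : List String) (ps.map Prod.fst) := by
    rw [hgrouped]
    rw [PySem.Dict.keys_foldl_modify_key ps Prod.fst [] (fun _ p => (fun cs => cs ++ [p.2])) PySem.Dict.empty]
    rw [PySem.Dict.keys_empty]
  have hgk' : grouped.keys = PySem.Set.ofList (ps.map Prod.fst) := by
    rw [hgk, PySem.Set.ofList_eq_foldl]; rfl
  have hgnd : grouped.keys.Nodup := by
    rw [hgk']; exact PySem.Set.nodup_ofList _
  have hgD : ∀ t, grouped.getD t [] = (ps.filter (fun p => p.1 == t)).map Prod.snd := by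
    intro t
    rw [hgrouped, PySem.Dict.getD_foldl_modify_append, PySem.Dict.getD_empty]
    simp
  have hand : (ps.foldl (fun u p => pvUpd u p.1 p.2) cur).keys.Nodup := by
    rw [foldUpd_keys]
    exact PySem.Set.nodup_update _ _ (PySem.Dict.nodup_keys_ofList current)
  apply items_ext _ _ hand
  · rw [foldUpd_keys, foldMerge_keys]
    have : grouped.items.map Prod.fst = grouped.keys := rfl
    rw [this, hgk', update_ofList]
  · intro t hmem
    have hAc : (ps.foldl (fun u p => pvUpd u p.1 p.2) cur).contains t = true := by
      rw [PySem.Dict.contains_iff_mem_keys]; exact hmem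
    have hBc : (grouped.items.foldl pvMerge cur).contains t = true := by
      rw [PySem.Dict.contains_iff_mem_keys, foldMerge_keys]
      rw [foldUpd_keys] at hmem
      have : grouped.items.map Prod.fst = grouped.keys := rfl
      rw [this, hgk', update_ofList]
      exact hmem
    rw [get?_eq_some_getD _ _ hAc, get?_eq_some_getD _ _ hBc]
    congr 1
    rw [foldUpd_getD]
    by_cases ht : t ∈ grouped.keys
    · have : ∃ pr ∈ grouped.items, pr.1 = t := by
        unfold PySem.Dict.keys at ht
        rcases List.mem_map.mp ht with ⟨pr, hpr, h⟩
        exact ⟨pr, hpr, h⟩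
      rcases this with ⟨pr, hpr, hprt⟩
      have hitems : (t, pr.2) ∈ grouped.items := by rw [← hprt]; exact hpr
      have hval : grouped.get? t = some pr.2 :=
        PySem.Dict.get?_of_mem_items grouped hitems hgnd
      have hval' : grouped.getD t [] = pr.2 := by
        rw [PySem.Dict.getD_eq_get?_getD, hval]; rfl
      rw [foldMerge_getD_mem grouped.items cur t pr.2 hgnd hitems, ← hval', hgD t]
    · have hnot : t ∉ grouped.items.map Prod.fst := ht
      rw [foldMerge_getD_notmem grouped.items cur t hnot]
      have hfil : ps.filter (fun p => p.1 == t) = [] := by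
        rw [List.filter_eq_nil_iff]
        intro p hp hpt
        apply ht
        rw [hgk', PySem.Set.mem_ofList]
        exact List.mem_map.mpr ⟨p, hp, by simpa using hpt⟩
      rw [hfil]
      rfl

-- ===== VERDICT (by name: the statement is the Claim_ definition above) =====
theorem apply_additions_py_spec : Claim_equal_apply_additions_py := by
  intro current additions valid _
  unfold Spec_apply_additions_py
  exact main_eq current additions valid
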